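-- pv_equiv track=rewrite | github.com/ozgurozdemir/boun_cmpe561_project | project02/TurkishGrammar.py | get_person
-- ===== SOURCE A (Python) =====
-- def get_person(morphemes):
--     person = None
--     number = None
--     for inf in morphemes:
--         if '1sg' in inf:
--             person = '1st'
--             number = 'Singular'
--         elif '1pl' in inf:
--             person = '1stPL'
--             number = 'Plural'
--         elif '2sg' in inf:
--             person = '2nd'
--             number = 'Singular'
--         elif '2pl' in inf:
--             person = '2ndPL'
--             number = 'Plural'
--         elif '3sg' in inf:
--             person = '3rd'
--             number = 'Singular'
--         elif '3pl' in inf: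
--             person = '3rdPL'
--             number = 'Plural'
--
--     return person, number
-- ===== SOURCE B (Python) =====
-- _TAGS = [
--     ('1sg', ('1st', 'Singular')),
--     ('1pl', ('1stPL', 'Plural')),
--     ('2sg', ('2nd', 'Singular')),
--     ('2pl', ('2ndPL', 'Plural')),
--     ('3sg', ('3rd', 'Singular')),
--     ('3pl', ('3rdPL', 'Plural')),
-- ]
--
-- def get_person(morphemes):
--     for inf in reversed(morphemes):
--         for tag, result in _TAGS:
--             if tag in inf:
--                 return result
--     return (None, None)
-- ===== Notes on version B (the rewrite author's own statement) =====
-- stated objective: idiomatic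
-- what changed: Replaces A's forward accumulate-and-overwrite fold over all morphemes with a backward short-circuiting search over an ordered tag table that returns at the first (i.e. last) matching morpheme.
import Mathlib
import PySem

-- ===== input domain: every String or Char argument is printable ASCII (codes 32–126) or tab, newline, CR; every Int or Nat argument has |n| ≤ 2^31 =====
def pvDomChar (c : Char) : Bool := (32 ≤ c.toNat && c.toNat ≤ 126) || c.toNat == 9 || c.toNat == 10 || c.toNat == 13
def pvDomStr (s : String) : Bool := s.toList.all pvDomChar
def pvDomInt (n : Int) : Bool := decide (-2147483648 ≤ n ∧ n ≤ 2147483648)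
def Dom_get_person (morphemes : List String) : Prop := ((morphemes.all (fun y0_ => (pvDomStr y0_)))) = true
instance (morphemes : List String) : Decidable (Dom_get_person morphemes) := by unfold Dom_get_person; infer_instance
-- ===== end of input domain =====

-- B replaces A's forward accumulate-and-overwrite loop with a backward short-circuiting
-- search over an ordered tag table (idiomatic; same exact result).


-- ===== PORT A =====
-- the body of A's for-loop: the elif chain overwriting (person, number)
def pvStepA (st : Option String × Option String) (inf : String) : Option String × Option String :=
  if PySem.Str.isIn "1sg" inf then (some "1st", some "Singular")
  else if PySem.Str.isIn "1pl" inf then (some "1stPL", some "Plural")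
  else if PySem.Str.isIn "2sg" inf then (some "2nd", some "Singular")
  else if PySem.Str.isIn "2pl" inf then (some "2ndPL", some "Plural")
  else if PySem.Str.isIn "3sg" inf then (some "3rd", some "Singular")
  else if PySem.Str.isIn "3pl" inf then (some "3rdPL", some "Plural")
  else st

def get_person (morphemes : List String) : Option String × Option String :=
  morphemes.foldl pvStepA (none, none)

-- ===== PORT B =====
def pvTags : List (String × (Option String × Option String)) :=
  [("1sg", (some "1st", some "Singular")),
   ("1pl", (some "1stPL", some "Plural")),
   ("2sg", (some "2nd", some "Singular")),
   ("2pl", (some "2ndPL", some "Plural")),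
   ("3sg", (some "3rd", some "Singular")),
   ("3pl", (some "3rdPL", some "Plural"))]

-- inner loop of B: first tag (in priority order) contained in inf
def pvLookupTag (inf : String) : Option (Option String × Option String) :=
  (pvTags.find? (fun p => PySem.Str.isIn p.1 inf)).map Prod.snd

-- outer loop of B: scan morphemes (already reversed), return at first match
def pvRevScan : List String → Option String × Option String
  | [] => (none, none)
  | inf :: rest =>
    match pvLookupTag inf with
    | some r => r
    | none => pvRevScan rest

def get_person_alt (morphemes : List String) : Option String × Option String :=
  pvRevScan morphemes.reverse

-- ===== PRECONDITION & SPEC =====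
def Spec_get_person (morphemes : List String) (out : Option String × Option String) : Prop := out = get_person_alt morphemes
instance (morphemes : List String) (out : Option String × Option String) : Decidable (Spec_get_person morphemes out) := by unfold Spec_get_person; infer_instance

-- ===== CLAIM (what is proved, stated in full; the proofs are below) =====
def Claim_equal_get_person : Prop := ∀ (morphemes : List String), Dom_get_person morphemes → Spec_get_person morphemes (get_person morphemes)

-- ===== LEMMAS AND PROOFS =====

-- first match over a whole list, as an Option
def pvFirstMatch : List String → Option (Option String × Option String)
  | [] => none
  | inf :: rest => (pvLookupTag inf).orElse (fun _ => pvFirstMatch rest)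

theorem pvStepA_eq_lookup (s : Option String × Option String) (inf : String) :
    pvStepA s inf = (pvLookupTag inf).getD s := by
  simp only [pvStepA, pvLookupTag, pvTags, List.find?]
  split_ifs <;> simp_all

theorem pvFirstMatch_append (xs ys : List String) :
    pvFirstMatch (xs ++ ys) = (pvFirstMatch xs).orElse (fun _ => pvFirstMatch ys) := by
  induction xs with
  | nil => simp [pvFirstMatch]
  | cons a t ih =>
    simp only [List.cons_append, pvFirstMatch, ih]
    cases pvLookupTag a <;> simp [Option.orElse]

theorem pvFoldl_eq_firstMatch (ms : List String) (s : Option String × Option String) :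
    ms.foldl pvStepA s = (pvFirstMatch ms.reverse).getD s := by
  induction ms generalizing s with
  | nil => simp [pvFirstMatch]
  | cons a t ih =>
    simp only [List.foldl_cons, ih, List.reverse_cons, pvFirstMatch_append]
    cases h : pvFirstMatch t.reverse with
    | some r => simp [Option.orElse]
    | none =>
      simp only [Option.orElse, pvFirstMatch]
      cases hl : pvLookupTag a <;>
        simp [pvStepA_eq_lookup, hl, Option.getD]

theorem pvRevScan_eq_firstMatch (l : List String) :
    pvRevScan l = (pvFirstMatch l).getD (none, none) := by
  induction l with
  | nil => rfl
  | cons a t ih =>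
    simp only [pvRevScan, pvFirstMatch, ih]
    cases pvLookupTag a <;> simp [Option.orElse]

-- ===== VERDICT (by name: the statement is the Claim_ definition above) =====
theorem get_person_spec : Claim_equal_get_person := by
  intro ms _
  unfold Spec_get_person get_person get_person_alt
  rw [pvFoldl_eq_firstMatch, pvRevScan_eq_firstMatch]
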